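-- pv_equiv track=rewrite | github.com/SimeonTsvetanov/Coding-Lessons | SoftUni Lessons/Python Development/Python Advanced January 2020/Python Advanced/25. PAST EXAMS/0.06 Python Advanced Exam - 24 October 2020/03. List Pureness.py | best_list_pureness
-- ===== SOURCE A (Python) =====
-- def best_list_pureness(nums: list, count: int):
--     best = -11111111111111
--     best_rotation = 0
--     rotation = 0
--
--     for _ in range(count):
--         new_list = []
--         for index in range(len(nums)):
--             num = nums[index]
--             new_list.append(num * index)
--         if sum(new_list) > best:
--             best = sum(new_list)
--             best_rotation = rotation
--         rotation += 1
--         nums = nums[-1:] + nums[:-1]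
--
--     return f"Best pureness {best} after {best_rotation} rotations"
-- ===== SOURCE B (Python) =====
-- def best_list_pureness(nums: list, count: int):
--     # Incremental update: rotating right by one changes pureness P to P + sum(nums) - n*last,
--     # so each rotation costs O(1) instead of O(n).
--     n = len(nums)
--     total = sum(nums)
--     p = sum(i * v for i, v in enumerate(nums))
--     best = -11111111111111
--     best_rotation = 0
--     for r in range(count):
--         if p > best:
--             best = p
--             best_rotation = r
--         if n:
--             p += total - n * nums[(n - 1 - r) % n]
--     return f"Best pureness {best} after {best_rotation} rotations"
-- ===== Notes on version B (the rewrite author's own statement) =====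
-- stated objective: faster
-- what changed: Instead of recomputing the full index-weighted sum for every rotation (rebuilding and summing a list each time), B computes the pureness once and updates it per rotation in O(1) via P_new = P + total_sum - n*last_element, reading the rotated list's last element by modular indexing into the original list.
import Mathlib
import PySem

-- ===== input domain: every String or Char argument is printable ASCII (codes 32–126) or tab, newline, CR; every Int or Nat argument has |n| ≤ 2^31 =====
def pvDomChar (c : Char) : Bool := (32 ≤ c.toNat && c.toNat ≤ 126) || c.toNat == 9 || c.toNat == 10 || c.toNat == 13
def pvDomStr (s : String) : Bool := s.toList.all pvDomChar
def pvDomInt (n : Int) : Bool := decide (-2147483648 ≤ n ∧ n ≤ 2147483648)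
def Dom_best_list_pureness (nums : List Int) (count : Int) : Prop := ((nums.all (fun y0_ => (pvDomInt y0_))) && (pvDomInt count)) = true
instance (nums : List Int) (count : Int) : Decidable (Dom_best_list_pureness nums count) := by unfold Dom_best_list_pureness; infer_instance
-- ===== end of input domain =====

-- B replaces A's per-rotation O(n) rebuild-and-sum by an O(1) incremental pureness update
-- (P_new = P + total - n*last), making the loop O(n + count) instead of O(count*n).


-- ===== PORT A =====
-- one iteration of A's outer loop; state = (best, best_rotation, rotation, nums)
def pvStepA (s : Int × Int × Int × List Int) (_ : Int) : Int × Int × Int × List Int :=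
  let best := s.1; let best_rotation := s.2.1; let rotation := s.2.2.1; let ns := s.2.2.2
  -- inner loop: new_list.append(nums[index] * index); index ∈ range(len(nums)) is always in range,
  -- so pyGetD with default 0 is exact here
  let new_list := (PySem.List.pyRange 0 (ns.length : Int) 1).foldl
    (fun (l : List Int) index => l ++ [PySem.List.pyGetD ns index 0 * index]) []
  let bb := if new_list.sum > best then (new_list.sum, rotation) else (best, best_rotation)
  (bb.1, bb.2, rotation + 1,
    PySem.List.slice ns (some (-1)) none ++ PySem.List.slice ns none (some (-1)))

def best_list_pureness (nums : List Int) (count : Int) : String :=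
  let st := (PySem.List.pyRange 0 count 1).foldl pvStepA (-11111111111111, 0, 0, nums)
  "Best pureness " ++ PySem.Int.toStr st.1 ++ " after " ++ PySem.Int.toStr st.2.1 ++ " rotations"

-- ===== PORT B =====
-- one iteration of B's loop; state = (best, best_rotation, p); r is the rotation index.
-- nums[(n-1-r) % n] is only evaluated when n ≠ 0, index is then in [0, n), so pyGetD is exact
def pvStepB (n total : Int) (nums : List Int) (s : Int × Int × Int) (r : Int) : Int × Int × Int :=
  let best := s.1; let best_rotation := s.2.1; let p := s.2.2
  let bb := if p > best then (p, r) else (best, best_rotation)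
  let p' := if n ≠ 0 then p + total - n * PySem.List.pyGetD nums (PySem.Int.mod (n - 1 - r) n) 0 else p
  (bb.1, bb.2, p')

def best_list_pureness_alt (nums : List Int) (count : Int) : String :=
  let n : Int := (nums.length : Int)
  let total := nums.sum
  let p0 := ((PySem.List.enumerate nums 0).map (fun iv => iv.1 * iv.2)).sum
  let st := (PySem.List.pyRange 0 count 1).foldl (pvStepB n total nums) (-11111111111111, 0, p0)
  "Best pureness " ++ PySem.Int.toStr st.1 ++ " after " ++ PySem.Int.toStr st.2.1 ++ " rotations"

-- ===== PRECONDITION & SPEC =====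
def Spec_best_list_pureness (nums : List Int) (count : Int) (out : String) : Prop := out = best_list_pureness_alt nums count
instance (nums : List Int) (count : Int) (out : String) : Decidable (Spec_best_list_pureness nums count out) := by unfold Spec_best_list_pureness; infer_instance

-- ===== CLAIM (what is proved, stated in full; the proofs are below) =====
def Claim_equal_best_list_pureness : Prop := ∀ (nums : List Int) (count : Int), Dom_best_list_pureness nums count → Spec_best_list_pureness nums count (best_list_pureness nums count)

-- ===== LEMMAS AND PROOFS =====

-- A's rotation step: nums[-1:] + nums[:-1]
def pvRot (xs : List Int) : List Int := xs.drop (xs.length - 1) ++ xs.dropLast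

-- index-weighted sum with starting index k : the "pureness" of xs
def pvWsum : List Int → Int → Int
  | [], _ => 0
  | x :: t, k => x * k + pvWsum t (k + 1)

lemma pvWsum_shift (t : List Int) (k : Int) : pvWsum t (k + 1) = pvWsum t k + t.sum := by
  induction t generalizing k with
  | nil => simp [pvWsum]
  | cons x t ih =>
    simp only [pvWsum, ih (k + 1), List.sum_cons]
    ring

lemma pvWsum_append_singleton (d : List Int) (l k : Int) :
    pvWsum (d ++ [l]) k = pvWsum d k + l * (k + d.length) := by
  induction d generalizing k with
  | nil => simp [pvWsum]
  | cons x t ih =>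
    simp only [List.cons_append, pvWsum, ih (k + 1), List.length_cons]
    push_cast
    ring

lemma pvRot_concat (d : List Int) (l : Int) : pvRot (d ++ [l]) = l :: d := by
  have h1 : (d ++ [l]).length - 1 = d.length := by simp
  simp [pvRot]

lemma pvRot_length (xs : List Int) : (pvRot xs).length = xs.length := by
  rcases List.eq_nil_or_concat xs with h | ⟨d, l, h⟩ <;> subst h
  · simp [pvRot]
  · simp [pvRot_concat]

lemma pvRot_sum (xs : List Int) : (pvRot xs).sum = xs.sum := by
  rcases List.eq_nil_or_concat xs with h | ⟨d, l, h⟩ <;> subst h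
  · simp [pvRot]
  · simp [pvRot_concat]
    ring

lemma pvWsum_rot (d : List Int) (l : Int) :
    pvWsum (pvRot (d ++ [l])) 0 = pvWsum (d ++ [l]) 0 + (d ++ [l]).sum - ((d ++ [l]).length : Int) * l := by
  rw [pvRot_concat]
  simp only [pvWsum, pvWsum_append_singleton, List.sum_append, List.sum_cons, List.sum_nil,
    List.length_append, List.length_cons, List.length_nil]
  rw [show (0 : Int) + 1 = 1 from rfl, show pvWsum d 1 = pvWsum d 0 + d.sum from by
    simpa using pvWsum_shift d 0]
  push_cast
  ring

lemma pvRotIter_nil (m : Nat) : pvRot^[m] ([] : List Int) = [] := by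
  induction m with
  | zero => simp
  | succ m ih => rw [Function.iterate_succ_apply', ih]; simp [pvRot]

lemma pvRotIter_length (xs : List Int) (m : Nat) : (pvRot^[m] xs).length = xs.length := by
  induction m with
  | zero => simp
  | succ m ih => rw [Function.iterate_succ_apply', pvRot_length, ih]

lemma pvRotIter_sum (xs : List Int) (m : Nat) : (pvRot^[m] xs).sum = xs.sum := by
  induction m with
  | zero => simp
  | succ m ih => rw [Function.iterate_succ_apply', pvRot_sum, ih]

-- closed form of m right-rotations
lemma pvRotIter_closed (xs : List Int) (h : xs ≠ []) (m : Nat) :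
    pvRot^[m] xs = xs.drop (xs.length - m % xs.length) ++ xs.take (xs.length - m % xs.length) := by
  have hn : 0 < xs.length := List.length_pos_iff.mpr h
  induction m with
  | zero => simp
  | succ m ih =>
    have hmlt : m % xs.length < xs.length := Nat.mod_lt m hn
    rw [Function.iterate_succ_apply', ih]
    have ht1 : 1 ≤ xs.length - m % xs.length := by omega
    have hidx : xs.length - m % xs.length - 1 < xs.length := by omega
    have hts : xs.take (xs.length - m % xs.length)
        = xs.take (xs.length - m % xs.length - 1) ++ [xs[xs.length - m % xs.length - 1]] := by
      rw [← List.take_succ_eq_append_getElem hidx]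
      congr 1
      omega
    have hsplit : xs.drop (xs.length - m % xs.length) ++ xs.take (xs.length - m % xs.length)
        = (xs.drop (xs.length - m % xs.length) ++ xs.take (xs.length - m % xs.length - 1))
          ++ [xs[xs.length - m % xs.length - 1]] := by
      rw [hts, ← List.append_assoc]
    rw [hsplit, pvRot_concat]
    have hcons : xs[xs.length - m % xs.length - 1] :: xs.drop (xs.length - m % xs.length)
        = xs.drop (xs.length - m % xs.length - 1) := by
      rw [List.drop_eq_getElem_cons hidx]
      congr 2
      omega
    rw [← List.cons_append, hcons]
    by_cases hm : m % xs.length = xs.length - 1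
    · have hmod : (m + 1) % xs.length = 0 := by
        by_cases h1 : xs.length = 1
        · rw [h1]; simp [Nat.mod_one]
        · rw [Nat.add_mod, hm, Nat.one_mod_eq_one.mpr (by omega)]
          rw [show xs.length - 1 + 1 = xs.length by omega, Nat.mod_self]
      have h0 : xs.length - m % xs.length - 1 = 0 := by omega
      rw [hmod, h0]
      simp
    · have hmod : (m + 1) % xs.length = m % xs.length + 1 := by
        rw [Nat.add_mod, Nat.one_mod_eq_one.mpr (by omega), Nat.mod_eq_of_lt (by omega)]
      rw [hmod]
      congr 2

-- A's inner loop computes the pureness of ns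
lemma pvRange_wsum (ns : List Int) (c : Int) :
    ((List.range ns.length).map (fun j => ns.getD j 0 * ((j : Int) + c))).sum = pvWsum ns c := by
  induction ns generalizing c with
  | nil => simp [pvWsum]
  | cons x t ih =>
    rw [show (x :: t).length = t.length + 1 from rfl, List.range_succ_eq_map]
    simp only [List.map_cons, List.map_map, List.sum_cons]
    have : ((List.range t.length).map ((fun j => (x :: t).getD j 0 * ((j : Int) + c)) ∘ (· + 1))).sum
        = ((List.range t.length).map (fun j => t.getD j 0 * ((j : Int) + (c + 1)))).sum := by
      congr 1
      apply List.map_congr_left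
      intro j _
      simp only [Function.comp_apply, List.getD_cons_succ]
      push_cast
      ring
    rw [this, ih (c + 1)]
    simp [pvWsum]

lemma pvInner_sum (ns : List Int) :
    ((PySem.List.pyRange 0 (ns.length : Int) 1).foldl
      (fun (l : List Int) index => l ++ [PySem.List.pyGetD ns index 0 * index]) []).sum
    = pvWsum ns 0 := by
  rw [PySem.List.foldl_append_singleton_eq_map]
  rw [PySem.List.pyRange_one]
  simp only [sub_zero, Int.toNat_natCast, List.map_map, List.nil_append]
  have : ((List.range ns.length).map ((fun index => PySem.List.pyGetD ns index 0 * index) ∘ (fun k => (0 : Int) + ↑k))).sum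
      = ((List.range ns.length).map (fun j => ns.getD j 0 * ((j : Int) + 0))).sum := by
    congr 1
    apply List.map_congr_left
    intro j _
    simp [PySem.List.pyGetD_natCast]
  rw [this, pvRange_wsum]

-- B's initial p is the pureness of nums
lemma pvEnum_wsum (ns : List Int) (k : Int) :
    ((PySem.List.enumerate ns k).map (fun iv => iv.1 * iv.2)).sum = pvWsum ns k := by
  induction ns generalizing k with
  | nil => simp [PySem.List.enumerate_nil, pvWsum]
  | cons x t ih =>
    rw [PySem.List.enumerate_cons]
    simp [ih (k + 1), pvWsum]
    ring

-- B's modular index in terms of Nat arithmetic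
lemma pvIdx_eq (len m : Nat) (h : 0 < len) :
    PySem.Int.mod ((len : Int) - 1 - (m : Int)) (len : Int) = ((len - 1 - m % len : Nat) : Int) := by
  rw [PySem.Int.mod_eq_emod_of_pos (by exact_mod_cast h)]
  have e1 := Int.sub_emod ((len:Int)-1) (m:Int) (len:Int)
  have e2 := Int.sub_emod ((len:Int)-1) ((m:Int) % (len:Int)) (len:Int)
  have e3 : (m:Int) % (len:Int) % (len:Int) = (m:Int) % (len:Int) := Int.emod_emod_of_dvd _ dvd_rfl
  rw [e1, ← e3, ← e2]
  have hmb : (m:Int) % (len:Int) = ((m % len : Nat) : Int) := by push_cast; ring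
  have hlt : (m % len) < len := Nat.mod_lt m h
  rw [hmb, Int.emod_eq_of_lt (by push_cast; omega) (by push_cast; omega)]
  push_cast
  omega

-- the pureness one more rotation ahead, via the incremental formula
lemma pvWsum_step (nums : List Int) (h : nums ≠ []) (m : Nat) :
    pvWsum (pvRot^[m + 1] nums) 0
      = pvWsum (pvRot^[m] nums) 0 + nums.sum
        - (nums.length : Int) * nums.getD (nums.length - 1 - m % nums.length) 0 := by
  have hn : 0 < nums.length := List.length_pos_iff.mpr h
  have hmlt : m % nums.length < nums.length := Nat.mod_lt m hn
  have hidx : nums.length - m % nums.length - 1 < nums.length := by omega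
  have hcl := pvRotIter_closed nums h m
  have hts : nums.take (nums.length - m % nums.length)
      = nums.take (nums.length - m % nums.length - 1) ++ [nums[nums.length - m % nums.length - 1]] := by
    rw [← List.take_succ_eq_append_getElem hidx]
    congr 1
    omega
  have hdl : pvRot^[m] nums
      = (nums.drop (nums.length - m % nums.length) ++ nums.take (nums.length - m % nums.length - 1))
        ++ [nums[nums.length - m % nums.length - 1]] := by
    rw [hcl, hts, ← List.append_assoc]
  rw [Function.iterate_succ_apply']
  rw [hdl, pvWsum_rot, ← hdl, pvRotIter_sum, pvRotIter_length]
  have hgetD : nums.getD (nums.length - 1 - m % nums.length) 0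
      = nums[nums.length - m % nums.length - 1] := by
    rw [List.getD_eq_getElem _ _ (by omega)]
    congr 1
    omega
  rw [hgetD]

-- the main loop invariant, by induction on the number of iterations
lemma pvLoop_inv (nums : List Int) (m : Nat) :
    (((List.range m).map (Nat.cast : Nat → Int)).foldl pvStepA (-11111111111111, 0, 0, nums))
      = (let sb := ((List.range m).map (Nat.cast : Nat → Int)).foldl
            (pvStepB (nums.length : Int) nums.sum nums) (-11111111111111, 0, pvWsum nums 0)
         (sb.1, sb.2.1, (m : Int), pvRot^[m] nums))
    ∧ (((List.range m).map (Nat.cast : Nat → Int)).foldl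
          (pvStepB (nums.length : Int) nums.sum nums) (-11111111111111, 0, pvWsum nums 0)).2.2
        = pvWsum (pvRot^[m] nums) 0 := by
  induction m with
  | zero => simp
  | succ m ih =>
    obtain ⟨ih1, ih2⟩ := ih
    rw [List.range_succ]
    simp only [List.map_append, List.map_cons, List.map_nil, List.foldl_append, List.foldl_cons,
      List.foldl_nil]
    rw [ih1]
    set sb := ((List.range m).map (Nat.cast : Nat → Int)).foldl
      (pvStepB (nums.length : Int) nums.sum nums) (-11111111111111, 0, pvWsum nums 0) with hsb
    clear_value sb
    obtain ⟨b, br, p⟩ := sb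
    simp only at ih2
    subst ih2
    by_cases hnil : nums = []
    · subst hnil
      constructor
      · simp [pvStepA, pvStepB, pvRotIter_nil, pvWsum,
          PySem.List.slice_from_neg_one, PySem.List.slice_to_neg_one]
      · simp [pvStepB, pvRotIter_nil, pvWsum]
    · have hn : 0 < nums.length := List.length_pos_iff.mpr hnil
      have hnz : (nums.length : Int) ≠ 0 := by exact_mod_cast hn.ne'
      have hp' : (if (nums.length : Int) ≠ 0 then
            pvWsum (pvRot^[m] nums) 0 + nums.sum
              - (nums.length : Int) * PySem.List.pyGetD nums
                  (PySem.Int.mod ((nums.length : Int) - 1 - (m : Int)) (nums.length : Int)) 0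
          else pvWsum (pvRot^[m] nums) 0) = pvWsum (pvRot^[m + 1] nums) 0 := by
        rw [if_pos hnz, pvIdx_eq nums.length m hn, PySem.List.pyGetD_natCast,
          pvWsum_step nums hnil m]
      constructor
      · simp only [pvStepA, pvStepB, pvInner_sum]
        rw [Function.iterate_succ_apply']
        refine Prod.ext ?_ (Prod.ext ?_ (Prod.ext ?_ ?_))
        · simp
        · simp
        · simp
        · simp only
          rw [PySem.List.slice_from_neg_one, PySem.List.slice_to_neg_one]
          rfl
      · simp only [pvStepB]
        simpa using hp'

-- ===== VERDICT (by name: the statement is the Claim_ definition above) =====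
theorem best_list_pureness_spec : Claim_equal_best_list_pureness := by
  intro nums count _
  unfold Spec_best_list_pureness best_list_pureness best_list_pureness_alt
  have hrange : PySem.List.pyRange 0 count 1 = (List.range (count).toNat).map (Nat.cast : Nat → Int) := by
    rw [PySem.List.pyRange_one]
    simp
  rw [hrange, pvEnum_wsum]
  obtain ⟨h1, -⟩ := pvLoop_inv nums count.toNat
  rw [h1]
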